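-- pv_equiv track=rewrite | github.com/Jexzas/islm | notai.py | convertTableToFreqTable
-- ===== SOURCE A (Python) =====
-- from collections import defaultdict
--
-- def convertTableToFreqTable(table):
--     finalTable = defaultdict(int)
--     actualFinalTable = {}
--
--     # Count occurrences of word pairs
--     for pair in table:
--         for key, value in pair.items():
--             finalTable[(key, value)] += 1
--
--     # Determine the most frequent next word for each word
--     word_max_freq = defaultdict(lambda: (None, 0))  # Stores (word, max count)
--
--     for (word, next_word), count in finalTable.items():
--         if count > word_max_freq[word][1]:  # Compare count with stored max
--             word_max_freq[word] = (next_word, count)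
--
--     # Convert to the desired dictionary format
--     actualFinalTable = {word: next_word for word, (next_word, _) in word_max_freq.items()}
--
--     return actualFinalTable
-- ===== SOURCE B (Python) =====
-- def convertTableToFreqTable(table):
--     stream = [kv for pair in table for kv in pair.items()]
--     result = {}
--     for w in dict.fromkeys(k for k, _ in stream):
--         vals = [v for k, v in stream if k == w]
--         result[w] = max(dict.fromkeys(vals), key=vals.count)
--     return result
-- ===== Notes on version B (the rewrite author's own statement) =====
-- stated objective: alternative
-- what changed: Drops all counting dictionaries: B flattens the pairs into one event stream, iterates the distinct words in first-occurrence order, and for each word picks its best follower by brute-force max over distinct followers keyed by list.count, instead of A's (word,next)->count hash table plus a second running-max pass.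
import Mathlib
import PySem

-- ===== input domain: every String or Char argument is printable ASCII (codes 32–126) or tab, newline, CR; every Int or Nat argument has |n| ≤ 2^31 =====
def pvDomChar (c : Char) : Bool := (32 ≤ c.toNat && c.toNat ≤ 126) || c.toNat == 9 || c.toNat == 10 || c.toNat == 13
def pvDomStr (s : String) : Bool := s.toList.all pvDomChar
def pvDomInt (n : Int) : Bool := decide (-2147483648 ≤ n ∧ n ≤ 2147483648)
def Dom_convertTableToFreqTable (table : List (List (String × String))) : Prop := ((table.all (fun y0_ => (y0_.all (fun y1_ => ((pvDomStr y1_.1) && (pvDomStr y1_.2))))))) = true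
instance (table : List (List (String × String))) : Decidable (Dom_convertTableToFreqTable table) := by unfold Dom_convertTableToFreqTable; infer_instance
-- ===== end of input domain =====

-- B drops A's counting dictionaries entirely: it flattens the pairs to one event stream and,
-- per distinct word, brute-forces the most frequent follower with list.count (objective: alternative).

-- ===== PORT A =====
-- port of A, step for step: finalTable = defaultdict(int) counting (key, value) pairs;
-- word_max_freq = defaultdict(lambda: (None, 0)) — the access word_max_freq[word] inserts
-- the default (ported as setdefault), the assignment overwrites in place.
def convertTableToFreqTable (table : List (List (String × String))) : List (String × String) :=
  let finalTable : PySem.Dict (String × String) Int :=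
    table.foldl (fun ft pair =>
      (PySem.Dict.ofList pair).items.foldl (fun ft kv => ft.modify kv 0 (· + 1)) ft)
      PySem.Dict.empty
  let wmf : PySem.Dict String (Option String × Int) :=
    finalTable.items.foldl (fun w it =>
      let wd := w.setdefault it.1.1 (none, 0)
      if it.2 > (wd.getD it.1.1 (none, 0)).2 then wd.insert it.1.1 (some it.1.2, it.2) else wd)
      PySem.Dict.empty
  -- final comprehension {word: next_word for …}; .getD "" is unreachable (every stored
  -- count is ≥ 1, so the (None, 0) default is always overwritten with a `some`)
  wmf.items.map (fun p => (p.1, p.2.1.getD ""))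

-- ===== PORT B =====
-- port of B: stream = flattened (key, value) events; dict.fromkeys = PySem.Set.ofList
-- (distinct elements in first-occurrence order); max(seq, key) = PySem.List.max?
-- (first maximal element, exactly Python's max); .getD "" is unreachable: each word in
-- the distinct-word list has at least one follower, so max? is over a nonempty list.
def convertTableToFreqTable_alt (table : List (List (String × String))) : List (String × String) :=
  let stream := table.flatMap (fun pair => (PySem.Dict.ofList pair).items)
  (PySem.Set.ofList (stream.map (·.1))).map (fun w =>
    let vals := (stream.filter (fun kv => kv.1 == w)).map (·.2)
    (w, (PySem.List.max? (PySem.Set.ofList vals) (fun v => (vals.count v : Int))).getD ""))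

-- ===== PRECONDITION & SPEC =====
def Spec_convertTableToFreqTable (table : List (List (String × String))) (out : List (String × String)) : Prop := out = convertTableToFreqTable_alt table
instance (table : List (List (String × String))) (out : List (String × String)) : Decidable (Spec_convertTableToFreqTable table out) := by unfold Spec_convertTableToFreqTable; infer_instance

-- ===== CLAIM (what is proved, stated in full; the proofs are below) =====
def Claim_equal_convertTableToFreqTable : Prop := ∀ (table : List (List (String × String))), Dom_convertTableToFreqTable table → Spec_convertTableToFreqTable table (convertTableToFreqTable table)

-- ===== LEMMAS AND PROOFS =====

-- the flattened stream of (key, value) events both programs consume, in order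
def pvStream (table : List (List (String × String))) : List (String × String) :=
  table.flatMap (fun pair => (PySem.Dict.ofList pair).items)

-- the values following word w in the stream
def pvVals (ps : List (String × String)) (w : String) : List String :=
  (ps.filter (fun p => p.1 == w)).map (·.2)

-- A's second-loop step
def pvAStep (w : PySem.Dict String (Option String × Int)) (it : (String × String) × Int) :
    PySem.Dict String (Option String × Int) :=
  if it.2 > ((w.setdefault it.1.1 (none, 0)).getD it.1.1 (none, 0)).2 then
    (w.setdefault it.1.1 (none, 0)).insert it.1.1 (some it.1.2, it.2)
  else w.setdefault it.1.1 (none, 0)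

lemma pv_contains_iff {κ ν : Type} [BEq κ] [LawfulBEq κ] (d : PySem.Dict κ ν) (k : κ) :
    d.contains k = true ↔ k ∈ d.keys := by
  simp [PySem.Dict.contains, PySem.Dict.keys, List.any_eq_true, List.mem_map]

-- ofList commutes with appending one element
lemma pv_ofList_append {α : Type} [BEq α] (l : List α) (x : α) :
    PySem.Set.ofList (l ++ [x]) = PySem.Set.add (PySem.Set.ofList l) x := by
  simp [PySem.Set.ofList, List.foldl_append]

-- first-occurrence dedup commutes with map along any function (keys side)
lemma pv_ofList_map_ofList {α β : Type} [BEq α] [LawfulBEq α] [BEq β] [LawfulBEq β]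
    (f : α → β) (l : List α) :
    PySem.Set.ofList ((PySem.Set.ofList l).map f) = PySem.Set.ofList (l.map f) := by
  induction l using List.reverseRecOn with
  | nil => rfl
  | append_singleton l x ih =>
      rw [pv_ofList_append, List.map_append, List.map_singleton, pv_ofList_append]
      by_cases hx : x ∈ PySem.Set.ofList l
      · rw [PySem.Set.add_of_mem hx, ih]
        have hfx : f x ∈ PySem.Set.ofList (l.map f) := by
          rw [PySem.Set.mem_ofList]
          exact List.mem_map_of_mem ((PySem.Set.mem_ofList _ _).1 hx)
        rw [PySem.Set.add_of_mem hfx]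
      · rw [PySem.Set.add_of_not_mem hx, List.map_append, List.map_singleton,
          pv_ofList_append, ih]

-- dedup commutes with filter
lemma pv_ofList_filter {α : Type} [BEq α] [LawfulBEq α] (p : α → Bool) (l : List α) :
    (PySem.Set.ofList l).filter p = PySem.Set.ofList (l.filter p) := by
  induction l using List.reverseRecOn with
  | nil => rfl
  | append_singleton l x ih =>
      rw [pv_ofList_append, List.filter_append]
      by_cases hx : x ∈ PySem.Set.ofList l
      · rw [PySem.Set.add_of_mem hx]
        by_cases hp : p x = true
        · have hxf : x ∈ PySem.Set.ofList (l.filter p) := by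
            rw [PySem.Set.mem_ofList, List.mem_filter]
            exact ⟨(PySem.Set.mem_ofList _ _).1 hx, hp⟩
          simp [hp, pv_ofList_append, ih, PySem.Set.add_of_mem hxf]
        · simp [hp, ih]
      · rw [PySem.Set.add_of_not_mem hx, List.filter_append]
        by_cases hp : p x = true
        · have hxf : x ∉ PySem.Set.ofList (l.filter p) := by
            rw [PySem.Set.mem_ofList, List.mem_filter]
            rw [PySem.Set.mem_ofList] at hx
            exact fun h => hx h.1
          simp [hp, pv_ofList_append, ih, PySem.Set.add_of_not_mem hxf]
        · simp [hp, ih]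

-- dedup commutes with an injective map
lemma pv_ofList_map_inj {α β : Type} [BEq α] [LawfulBEq α] [BEq β] [LawfulBEq β]
    (g : α → β) (hg : Function.Injective g) (l : List α) :
    PySem.Set.ofList (l.map g) = (PySem.Set.ofList l).map g := by
  induction l using List.reverseRecOn with
  | nil => rfl
  | append_singleton l x ih =>
      rw [List.map_append, List.map_singleton, pv_ofList_append, pv_ofList_append, ih]
      by_cases hx : x ∈ PySem.Set.ofList l
      · have : g x ∈ (PySem.Set.ofList l).map g := List.mem_map_of_mem hx
        rw [PySem.Set.add_of_mem this, PySem.Set.add_of_mem hx]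
      · have : g x ∉ (PySem.Set.ofList l).map g := by
          intro h
          rcases List.mem_map.1 h with ⟨y, hy, he⟩
          exact hx (hg he ▸ hy)
        rw [PySem.Set.add_of_not_mem this, PySem.Set.add_of_not_mem hx, List.map_append]
        rfl

-- a pair counted in ps is its value counted among w's followers
lemma pv_count_pair (ps : List (String × String)) (w n : String) :
    ps.count (w, n) = (pvVals ps w).count n := by
  induction ps with
  | nil => rfl
  | cons p ps ih =>
      by_cases hw : p.1 = w
      · by_cases hn : p.2 = n
        · have hp : p = (w, n) := by cases p; simp_all
          subst hp
          simp only [pvVals, List.filter_cons] at *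
          simp [ih]
        · have : p ≠ (w, n) := by intro h; exact hn (by cases p; simp_all)
          simp [pvVals, hw, hn, this, ih]
      · have : p ≠ (w, n) := by intro h; exact hw (by cases p; simp_all)
        simp [pvVals, hw, this, ih]

-- the pairs with first component w are exactly w paired with their values
lemma pv_filter_eq_map_vals (ps : List (String × String)) (w : String) :
    ps.filter (fun p => p.1 == w) = (pvVals ps w).map (fun n => (w, n)) := by
  induction ps with
  | nil => rfl
  | cons p ps ih =>
      simp only [pvVals, List.filter_cons] at ih ⊢
      by_cases hw : p.1 = w
      · obtain ⟨a, b⟩ := p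
        simp only at hw
        subst hw
        simp only [beq_self_eq_true, if_true, List.map_cons]
        exact congrArg _ ih
      · have hb : (p.1 == w) = false := by simp [hw]
        simp only [hb, Bool.false_eq_true, if_false]
        exact ih

-- ===== A-side characterisation =====

lemma pv_aStep_keys (d : PySem.Dict String (Option String × Int)) (it : (String × String) × Int) :
    (pvAStep d it).keys = PySem.Set.add d.keys it.1.1 := by
  unfold pvAStep
  set k := it.1.1 with hk
  have hsd : (d.setdefault k (none, 0)).keys = PySem.Set.add d.keys k := by
    rw [PySem.Dict.keys_setdefault]
    by_cases hc : d.contains k = true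
    · rw [if_pos hc, PySem.Set.add_of_mem ((pv_contains_iff d k).1 hc)]
    · rw [if_neg hc]
      have : k ∉ d.keys := fun h => hc ((pv_contains_iff d k).2 h)
      rw [PySem.Set.add_of_not_mem this]
  split
  · have := PySem.Dict.keys_foldl_insert (ν := Option String × Int) [k]
      (fun _ _ => (some it.1.2, it.2)) (d.setdefault k (none, 0))
    simp only [List.foldl_cons, List.foldl_nil] at this
    rw [this, hsd]
    have hmem : k ∈ PySem.Set.add d.keys k := by
      rw [PySem.Set.mem_add]; right; rfl
    simp [PySem.Set.update]
  · exact hsd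

lemma pv_aFold_keys (L : List ((String × String) × Int)) (d : PySem.Dict String (Option String × Int)) :
    (L.foldl pvAStep d).keys = PySem.Set.update d.keys (L.map (·.1.1)) := by
  induction L generalizing d with
  | nil => rfl
  | cons it L ih =>
      rw [List.foldl_cons, ih, pv_aStep_keys]
      rfl

lemma pv_aStep_getD (d : PySem.Dict String (Option String × Int)) (it : (String × String) × Int)
    (w : String) :
    (pvAStep d it).getD w (none, 0) =
      if it.1.1 = w then
        (if it.2 > (d.getD w (none, 0)).2 then (some it.1.2, it.2) else d.getD w (none, 0))
      else d.getD w (none, 0) := by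
  unfold pvAStep
  by_cases hw : it.1.1 = w
  · rw [hw, if_pos rfl, PySem.Dict.getD_setdefault_self]
    split
    · rw [PySem.Dict.getD_insert_self]
    · rw [PySem.Dict.getD_setdefault_self]
  · have hne : w ≠ it.1.1 := fun h => hw h.symm
    rw [if_neg hw, PySem.Dict.getD_setdefault_self]
    split
    · rw [PySem.Dict.getD_insert_of_ne _ _ _ hne]
      simp [PySem.Dict.getD, PySem.Dict.get?_setdefault_of_ne _ _ hne]
    · simp [PySem.Dict.getD, PySem.Dict.get?_setdefault_of_ne _ _ hne]

lemma pv_aFold_getD (L : List ((String × String) × Int)) (d : PySem.Dict String (Option String × Int))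
    (w : String) :
    (L.foldl pvAStep d).getD w (none, 0) =
      (L.filter (fun it => it.1.1 == w)).foldl
        (fun best it => if it.2 > best.2 then (some it.1.2, it.2) else best)
        (d.getD w (none, 0)) := by
  induction L generalizing d with
  | nil => rfl
  | cons it L ih =>
      rw [List.foldl_cons, ih, List.filter_cons]
      by_cases hw : it.1.1 = w
      · simp [hw, pv_aStep_getD, List.foldl_cons]
      · simp [hw, pv_aStep_getD]

-- ===== the running strict-> scan is max? (first maximal element) =====

lemma pv_scan_some (f : String → Int) (K : List String) (m : String) :
    (K.foldl (fun best n => if f n > best.2 then (some n, f n) else best)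
      ((some m : Option String), f m)).1 = PySem.List.max? (m :: K) f := by
  induction K generalizing m with
  | nil => rfl
  | cons n K ih =>
      simp only [List.foldl_cons, gt_iff_lt]
      by_cases h : f m < f n
      · rw [if_pos h, ih n]
        show _ = PySem.List.max? (m :: n :: K) f
        simp only [PySem.List.max?, List.foldl_cons]
        congr 1
        show some n = (if f m < f n then some n else some m)
        rw [if_pos h]
      · rw [if_neg h, ih m]
        simp only [PySem.List.max?, List.foldl_cons]
        congr 1
        show some m = (if f m < f n then some n else some m)
        rw [if_neg h]

lemma pv_scan_eq_max? (f : String → Int) (K : List String) (hpos : ∀ n ∈ K, 0 < f n) :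
    (K.foldl (fun best n => if f n > best.2 then (some n, f n) else best)
      ((none : Option String), (0 : Int))).1 = PySem.List.max? K f := by
  cases K with
  | nil => rfl
  | cons n K =>
      simp only [List.foldl_cons, gt_iff_lt]
      rw [if_pos (hpos n (List.mem_cons_self))]
      exact pv_scan_some f K n

-- ===== both programs as functions of the event stream =====

lemma pv_a_eq (table : List (List (String × String))) :
    convertTableToFreqTable table =
      ((PySem.Dict.counter (pvStream table)).items.foldl pvAStep PySem.Dict.empty).items.map
        (fun p => (p.1, p.2.1.getD "")) := by
  unfold convertTableToFreqTable pvStream pvAStep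
  rw [PySem.Dict.counter_eq_foldl, List.flatMap_def, List.foldl_flatten, List.foldl_map]

lemma pv_b_eq (table : List (List (String × String))) :
    convertTableToFreqTable_alt table =
      (PySem.Set.ofList ((pvStream table).map (·.1))).map (fun w =>
        (w, (PySem.List.max? (PySem.Set.ofList (pvVals (pvStream table) w))
              (fun v => ((pvVals (pvStream table) w).count v : Int))).getD "")) := by
  rfl

-- A's per-word entry is the strict-> scan over the distinct followers of w with their counts
lemma pv_aVal (ps : List (String × String)) (w : String) :
    ((PySem.Dict.counter ps).items.foldl pvAStep PySem.Dict.empty).getD w (none, 0) =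
      (PySem.Set.ofList (pvVals ps w)).foldl
        (fun best n => if ((pvVals ps w).count n : Int) > best.2
          then (some n, ((pvVals ps w).count n : Int)) else best)
        ((none : Option String), (0 : Int)) := by
  rw [pv_aFold_getD, PySem.Dict.items_counter]
  have h1 : (((PySem.Set.ofList ps).map (fun k => (k, (ps.count k : Int)))).filter
      (fun it => it.1.1 == w)) =
      ((PySem.Set.ofList ps).filter (fun k => k.1 == w)).map (fun k => (k, (ps.count k : Int))) :=
    List.filter_map
  rw [h1, pv_ofList_filter, pv_filter_eq_map_vals,
    pv_ofList_map_inj (fun n => (w, n)) (fun a b h => congrArg Prod.snd h),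
    List.map_map, List.foldl_map]
  have hd : (PySem.Dict.empty : PySem.Dict String (Option String × Int)).getD w (none, 0)
      = (none, 0) := rfl
  rw [hd]
  apply PySem.List.foldl_congr_mem
  intro best n _
  simp only [Function.comp]
  rw [pv_count_pair]

-- the core stream-level equivalence
lemma pv_core (ps : List (String × String)) :
    ((PySem.Dict.counter ps).items.foldl pvAStep PySem.Dict.empty).items.map
        (fun p => (p.1, p.2.1.getD "")) =
    (PySem.Set.ofList (ps.map (·.1))).map (fun w =>
      (w, (PySem.List.max? (PySem.Set.ofList (pvVals ps w))
            (fun v => ((pvVals ps w).count v : Int))).getD "")) := by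
  set A1 := (PySem.Dict.counter ps).items.foldl pvAStep PySem.Dict.empty with hA1
  have hAkeys : A1.keys = PySem.Set.ofList (ps.map (·.1)) := by
    rw [hA1, pv_aFold_keys, PySem.Dict.items_counter, List.map_map]
    show PySem.Set.update PySem.Set.empty ((PySem.Set.ofList ps).map (·.1)) = _
    show PySem.Set.ofList ((PySem.Set.ofList ps).map (·.1)) = _
    exact pv_ofList_map_ofList (·.1) ps
  have hAnodup : A1.keys.Nodup := by rw [hAkeys]; exact PySem.Set.nodup_ofList _
  rw [PySem.Dict.items_eq_map_keys A1 hAnodup (none, 0), hAkeys, List.map_map]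
  apply List.map_congr_left
  intro w _
  simp only [Function.comp]
  have hApos : ∀ n ∈ PySem.Set.ofList (pvVals ps w), 0 < ((pvVals ps w).count n : Int) := by
    intro n hn
    have : n ∈ pvVals ps w := (PySem.Set.mem_ofList _ _).1 hn
    have := List.count_pos_iff.2 this
    omega
  rw [pv_aVal, pv_scan_eq_max? _ _ hApos]

-- ===== VERDICT (by name: the statement is the Claim_ definition above) =====
theorem convertTableToFreqTable_spec : Claim_equal_convertTableToFreqTable := by
  intro table _
  show _ = _
  rw [pv_a_eq, pv_b_eq, pv_core]
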